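-- pv_equiv track=rewrite | github.com/Enormaxxos/prvniSemestrCUNI | progCvi1/6/06_frekvence_bigramu.py | bigramCount
-- ===== SOURCE A (Python) =====
-- def bigramCount(str):
--     str = str.lower()
--
--     bigramDict = dict()
--
--     strArr = str.split()
--
--     for str in strArr:
--         for i in range(len(str) - 1):
--             bigram = str[i : i + 2]
--
--             if not bigram.isalpha():
--                 continue
--
--             try:
--                 bigramDict[bigram] += 1
--             except KeyError:
--                 bigramDict[bigram] = 1
--
--
--     sizeDict = dict()
--     for key,val in bigramDict.items():
--         try:
--             sizeDict[val].append(key)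
--         except:
--             sizeDict[val] = []
--             sizeDict[val].append(key)
--
--     finalString = ""
--
--     sortedSizeDict = sorted(sizeDict,reverse=True)
--
--     for key in sortedSizeDict:
--         sortedBigrams = sorted(sizeDict[key])
--         for bigram in sortedBigrams:
--             finalString += f"{bigram} {key}\n"
--
--     return finalString[:-1]
-- ===== SOURCE B (Python) =====
-- def bigramCount(str):
--     str = str.lower()
--     counts = {}
--     for word in str.split():
--         for i in range(len(word) - 1):
--             bg = word[i : i + 2]
--             if bg.isalpha():
--                 counts[bg] = counts.get(bg, 0) + 1
--     pairs = sorted(counts.items(), key=lambda kv: (-kv[1], kv[0]))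
--     return "\n".join(f"{bg} {n}" for bg, n in pairs)
-- ===== Notes on version B (the rewrite author's own statement) =====
-- stated objective: simpler
-- what changed: The count-to-bigrams inverted index (sizeDict) and its nested sort-by-size-then-sort-each-group string building are replaced by one composite-key sort of the (bigram, count) pairs with key (-count, bigram), and the formatted lines are newline-joined.
import Mathlib
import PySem

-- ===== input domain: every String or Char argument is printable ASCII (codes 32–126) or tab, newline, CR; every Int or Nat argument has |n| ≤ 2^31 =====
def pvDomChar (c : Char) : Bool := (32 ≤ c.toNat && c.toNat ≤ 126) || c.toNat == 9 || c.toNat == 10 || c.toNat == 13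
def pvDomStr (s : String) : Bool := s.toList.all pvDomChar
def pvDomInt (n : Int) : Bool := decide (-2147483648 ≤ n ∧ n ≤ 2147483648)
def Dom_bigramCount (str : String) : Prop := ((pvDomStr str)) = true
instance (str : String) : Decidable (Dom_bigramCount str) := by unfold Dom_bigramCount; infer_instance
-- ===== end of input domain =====

-- B replaces A's count→bigrams inverted index (sizeDict) and its nested sorts by one
-- composite-key sort (-count, bigram) of the (bigram, count) pairs, newline-joined (objective: simpler).

-- ===== PORT A =====
def bigramCount (str : String) : String :=
  let str1 := PySem.Str.lower str
  let bigramDict : PySem.Dict String Int := PySem.Dict.empty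
  let strArr := PySem.Str.split₀ str1
  let bigramDict := strArr.foldl (fun d w =>
    (PySem.List.pyRange 0 (PySem.Str.len w - 1) 1).foldl (fun d i =>
      let bigram := PySem.Str.slice w (some i) (some (i + 2))
      if ¬ (PySem.Str.strIsalpha bigram = true) then d
      else
        match d.get? bigram with
        | some v => d.insert bigram (v + 1)
        | none   => d.insert bigram 1) d) bigramDict
  let sizeDict : PySem.Dict Int (List String) := PySem.Dict.empty
  let sizeDict := bigramDict.items.foldl (fun sd kv =>
    match sd.get? kv.2 with
    | some l => sd.insert kv.2 (l ++ [kv.1])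
    | none   => sd.insert kv.2 ([] ++ [kv.1])) sizeDict
  let finalString := ""
  let sortedSizeDict := PySem.List.sorted sizeDict.keys (fun x => x) true
  let finalString := sortedSizeDict.foldl (fun acc key =>
    (PySem.List.sorted (sizeDict.getD key []) (fun x => x) false).foldl (fun acc bigram =>
      acc ++ (bigram ++ " " ++ PySem.Int.toStr key ++ "\n")) acc) finalString
  PySem.Str.slice finalString none (some (-1))

-- ===== PORT B =====
def bigramCount_alt (str : String) : String :=
  let s := PySem.Str.lower str
  let counts : PySem.Dict String Int := (PySem.Str.split₀ s).foldl (fun d w =>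
    (PySem.List.pyRange 0 (PySem.Str.len w - 1) 1).foldl (fun d i =>
      let bg := PySem.Str.slice w (some i) (some (i + 2))
      if PySem.Str.strIsalpha bg then d.insert bg (d.getD bg 0 + 1) else d) d) PySem.Dict.empty
  let pairs := PySem.List.sorted2 counts.items (fun kv => -kv.2) (fun kv => kv.1)
  PySem.Str.join "\n" (pairs.map (fun kv => kv.1 ++ " " ++ PySem.Int.toStr kv.2))

-- ===== PRECONDITION & SPEC =====
def Spec_bigramCount (str : String) (out : String) : Prop := out = bigramCount_alt str
instance (str : String) (out : String) : Decidable (Spec_bigramCount str out) := by unfold Spec_bigramCount; infer_instance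

-- ===== CLAIM (what is proved, stated in full; the proofs are below) =====
def Claim_equal_bigramCount : Prop := ∀ (str : String), Dom_bigramCount str → Spec_bigramCount str (bigramCount str)

-- ===== LEMMAS AND PROOFS =====

-- the composite sort key of B: (-count, bigram), lexicographic
def pvLexKey (p : String × Int) : Lex (Int × String) := toLex (-p.2, p.1)

-- bigrams counted c times, in dict insertion order
def pvGroupOf (items : List (String × Int)) (c : Int) : List String :=
  (items.filter (fun p => p.2 == c)).map (fun p => p.1)

-- the pair sequence both programs emit
def pvYs (items : List (String × Int)) : List (String × Int) :=
  (PySem.List.sorted (PySem.Set.ofList (items.map (fun p => p.2))) (fun x => x) true).flatMap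
    (fun c => (PySem.List.sorted (pvGroupOf items c) (fun x => x) false).map (fun bg => (bg, c)))

def pvSconcat (L : List String) : String := L.foldl (· ++ ·) ""

-- A's try/except increment equals B's .get(bg, 0)+1 increment, lifted through both loops
lemma pv_counts_eq (ws : List String) :
    ws.foldl (fun d w =>
      (PySem.List.pyRange 0 (PySem.Str.len w - 1) 1).foldl (fun d i =>
        let bigram := PySem.Str.slice w (some i) (some (i + 2))
        if ¬ (PySem.Str.strIsalpha bigram = true) then d
        else
          match d.get? bigram with
          | some v => d.insert bigram (v + 1)
          | none   => d.insert bigram 1) d) (PySem.Dict.empty : PySem.Dict String Int)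
    = ws.foldl (fun d w =>
      (PySem.List.pyRange 0 (PySem.Str.len w - 1) 1).foldl (fun d i =>
        let bg := PySem.Str.slice w (some i) (some (i + 2))
        if PySem.Str.strIsalpha bg then d.insert bg (d.getD bg 0 + 1) else d) d) PySem.Dict.empty := by
  have h : (fun (d : PySem.Dict String Int) (w : String) =>
      (PySem.List.pyRange 0 (PySem.Str.len w - 1) 1).foldl (fun d i =>
        let bigram := PySem.Str.slice w (some i) (some (i + 2))
        if ¬ (PySem.Str.strIsalpha bigram = true) then d
        else
          match d.get? bigram with
          | some v => d.insert bigram (v + 1)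
          | none   => d.insert bigram 1) d)
      = (fun d w =>
      (PySem.List.pyRange 0 (PySem.Str.len w - 1) 1).foldl (fun d i =>
        let bg := PySem.Str.slice w (some i) (some (i + 2))
        if PySem.Str.strIsalpha bg then d.insert bg (d.getD bg 0 + 1) else d) d) := by
    funext d w
    have h2 : (fun (d : PySem.Dict String Int) (i : Int) =>
        let bigram := PySem.Str.slice w (some i) (some (i + 2))
        if ¬ (PySem.Str.strIsalpha bigram = true) then d
        else
          match d.get? bigram with
          | some v => d.insert bigram (v + 1)
          | none   => d.insert bigram 1)
        = (fun d i =>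
        let bg := PySem.Str.slice w (some i) (some (i + 2))
        if PySem.Str.strIsalpha bg then d.insert bg (d.getD bg 0 + 1) else d) := by
      funext d i
      cases ha : PySem.Str.strIsalpha (PySem.Str.slice w (some i) (some (i + 2))) with
      | false => simp only [ha, Bool.false_eq_true, not_false_eq_true, if_true, if_false]
      | true =>
        simp only [ha, not_true_eq_false, if_false, if_true]
        cases hg : d.get? (PySem.Str.slice w (some i) (some (i + 2))) with
        | some v => rw [PySem.Dict.getD_of_get?_eq_some _ _ hg]
        | none => rw [PySem.Dict.getD_of_get?_eq_none _ _ hg]; norm_num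
    rw [h2]
  rw [h]

-- any foldl of key-nodup-preserving steps preserves key nodup
lemma pv_foldl_keys_nodup {κ ν α : Type} [BEq κ] (step : PySem.Dict κ ν → α → PySem.Dict κ ν)
    (h : ∀ d x, d.keys.Nodup → (step d x).keys.Nodup) :
    ∀ (l : List α) (d : PySem.Dict κ ν), d.keys.Nodup → (l.foldl step d).keys.Nodup := by
  intro l
  induction l with
  | nil => intro d hd; exact hd
  | cons x xs ih => intro d hd; exact ih _ (h d x hd)

-- the counting dict has pairwise-distinct bigram keys
lemma pv_count_keys_nodup (ws : List String) :
    ((ws.foldl (fun d w =>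
      (PySem.List.pyRange 0 (PySem.Str.len w - 1) 1).foldl (fun d i =>
        let bg := PySem.Str.slice w (some i) (some (i + 2))
        if PySem.Str.strIsalpha bg then d.insert bg (d.getD bg 0 + 1) else d) d)
      (PySem.Dict.empty : PySem.Dict String Int)).items.map (fun p => p.1)).Nodup := by
  exact pv_foldl_keys_nodup (κ := String) (ν := Int)
    (fun d w =>
      (PySem.List.pyRange 0 (PySem.Str.len w - 1) 1).foldl (fun d i =>
        let bg := PySem.Str.slice w (some i) (some (i + 2))
        if PySem.Str.strIsalpha bg then d.insert bg (d.getD bg 0 + 1) else d) d)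
    (by
      intro d w hd
      refine pv_foldl_keys_nodup _ ?_ _ d hd
      intro d i hdi
      simp only
      cases ha : PySem.Str.strIsalpha (PySem.Str.slice w (some i) (some (i + 2))) with
      | false => simpa [ha] using hdi
      | true => simp only [if_true]; exact PySem.Dict.nodup_keys_insert _ _ _ hdi)
    ws PySem.Dict.empty (by simp [PySem.Dict.keys_empty])

-- A's grouping fold, rewritten as a modify-fold over the swapped items
lemma pv_size_fold_eq (items : List (String × Int)) :
    items.foldl (fun sd kv =>
      match sd.get? kv.2 with
      | some l => sd.insert kv.2 (l ++ [kv.1])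
      | none   => sd.insert kv.2 ([] ++ [kv.1])) (PySem.Dict.empty : PySem.Dict Int (List String))
    = (items.map Prod.swap).foldl (fun sd p => sd.modify p.1 [] (fun l => l ++ [p.2])) PySem.Dict.empty := by
  rw [List.foldl_map]
  have h : (fun (sd : PySem.Dict Int (List String)) (kv : String × Int) =>
      match sd.get? kv.2 with
      | some l => sd.insert kv.2 (l ++ [kv.1])
      | none   => sd.insert kv.2 ([] ++ [kv.1]))
      = (fun sd kv => sd.modify (Prod.swap kv).1 [] (fun l => l ++ [(Prod.swap kv).2])) := by
    funext sd kv
    show _ = sd.insert kv.2 ((sd.getD kv.2 []) ++ [kv.1])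
    cases hg : sd.get? kv.2 with
    | some l => rw [PySem.Dict.getD_of_get?_eq_some _ _ hg]
    | none => rw [PySem.Dict.getD_of_get?_eq_none _ _ hg]
  rw [h]

lemma pv_size_getD (items : List (String × Int)) (c : Int) :
    ((items.map Prod.swap).foldl (fun sd p => sd.modify p.1 [] (fun l => l ++ [p.2]))
      (PySem.Dict.empty : PySem.Dict Int (List String))).getD c [] = pvGroupOf items c := by
  rw [PySem.Dict.getD_foldl_modify_append, pvGroupOf]
  simp [List.filter_map, Function.comp_def]

lemma pv_size_keys (items : List (String × Int)) :
    ((items.map Prod.swap).foldl (fun sd p => sd.modify p.1 [] (fun l => l ++ [p.2]))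
      (PySem.Dict.empty : PySem.Dict Int (List String))).keys
    = PySem.Set.ofList (items.map (fun p => p.2)) := by
  rw [PySem.Dict.keys_foldl_modify_key (items.map Prod.swap) (fun p => p.1) []
      (fun _ p => (fun l => l ++ [p.2])) PySem.Dict.empty]
  simp [PySem.Set.update_nil_left, PySem.Dict.keys_empty, List.map_map, Function.comp_def]

-- sorted2 with keys (-count) then bigram is one sort by the lexicographic key
lemma pv_sorted2_eq (xs : List (String × Int)) :
    PySem.List.sorted2 xs (fun kv => -kv.2) (fun kv => kv.1)
    = PySem.List.sorted xs pvLexKey := by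
  have hb : (fun (a b : String × Int) => decide (-a.2 < -b.2) || (!decide (-b.2 < -a.2) && decide (a.1 < b.1)))
      = (fun (a b : String × Int) => decide (pvLexKey a < pvLexKey b)) := by
    funext a b
    rw [Bool.eq_iff_iff]
    simp only [Bool.or_eq_true, Bool.and_eq_true, Bool.not_eq_true', decide_eq_true_eq,
      decide_eq_false_iff_not, pvLexKey, Prod.Lex.lt_iff, ofLex_toLex]
    constructor
    · rintro (h | ⟨h1, h2⟩)
      · exact Or.inl h
      · rcases (not_lt.mp h1).lt_or_eq with h | h
        · exact Or.inl h
        · exact Or.inr ⟨h, h2⟩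
    · rintro (h | ⟨h1, h2⟩)
      · exact Or.inl h
      · exact Or.inr ⟨not_lt.mpr (le_of_eq h1), h2⟩
  simp only [PySem.List.sorted2, PySem.List.sorted, if_neg, Bool.false_eq_true, not_false_eq_true]
  rw [hb]

-- distinct group representatives: concatenating the filters recovers the list
lemma pv_perm_flatMap_filter {α β : Type} [BEq β] [LawfulBEq β] (f : α → β) :
    ∀ (cs : List β) (l : List α), cs.Nodup → (∀ a ∈ l, f a ∈ cs) →
      (cs.flatMap (fun c => l.filter (fun a => f a == c))).Perm l := by
  intro cs
  induction cs with
  | nil =>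
    intro l _ hcov
    have : l = [] := List.eq_nil_iff_forall_not_mem.mpr (fun a ha => by simpa using hcov a ha)
    simp [this]
  | cons c cs ih =>
    intro l hnd hcov
    rw [List.flatMap_cons]
    have hrest : cs.flatMap (fun c' => l.filter (fun a => f a == c'))
        = cs.flatMap (fun c' => (l.filter (fun a => !(f a == c))).filter (fun a => f a == c')) := by
      apply List.flatMap_congr
      intro c' hc'
      rw [List.filter_filter]
      apply List.filter_congr
      intro a _
      cases hfa : (f a == c') with
      | false => simp
      | true =>
        have : f a = c' := by simpa using hfa
        have hne : c ≠ c' := fun h => (List.nodup_cons.mp hnd).1 (h ▸ hc')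
        simp [this, beq_eq_false_iff_ne, hne.symm]
    rw [hrest]
    have hcov' : ∀ a ∈ l.filter (fun a => !(f a == c)), f a ∈ cs := by
      intro a ha
      rcases List.mem_filter.mp ha with ⟨hal, hne⟩
      rcases List.mem_cons.mp (hcov a hal) with h | h
      · simp_all
      · exact h
    exact List.Perm.trans
      (List.Perm.append_left _ (ih _ (List.nodup_cons.mp hnd).2 hcov'))
      (List.filter_append_perm _ l)

-- A's group-by-count presentation IS the composite-key sort
lemma pv_sorted_lex_eq (items : List (String × Int))
    (hnd : (items.map (fun p => p.1)).Nodup) :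
    PySem.List.sorted items pvLexKey = pvYs items := by
  have hcsp := PySem.List.sorted_perm (PySem.Set.ofList (items.map (fun p => p.2))) (fun x => x) true
  have hcsnd : (PySem.List.sorted (PySem.Set.ofList (items.map (fun p => p.2))) (fun x => x) true).Nodup :=
    hcsp.nodup_iff.mpr (PySem.Set.nodup_ofList _)
  have hgnd : ∀ c, (pvGroupOf items c).Nodup := by
    intro c
    exact List.Nodup.sublist (List.Sublist.map _ (List.filter_sublist)) hnd
  have hsgnd : ∀ c, (PySem.List.sorted (pvGroupOf items c) (fun x => x) false).Nodup := by
    intro c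
    exact (PySem.List.sorted_perm _ _ _).nodup_iff.mpr (hgnd c)
  have hmap_eq : ∀ c, ((items.filter (fun p => p.2 == c)).map (fun p => p.1)).map (fun bg => (bg, c))
      = items.filter (fun p => p.2 == c) := by
    intro c
    rw [List.map_map]
    conv_rhs => rw [← List.map_id (items.filter (fun p => p.2 == c))]
    apply List.map_congr_left
    intro p hp
    have h2 : p.2 = c := by simpa using (List.mem_filter.mp hp).2
    simp [Prod.ext_iff, h2]
  apply PySem.List.sorted_eq_of_perm_of_pairwise_lt
  · -- pvYs items ~ items
    unfold pvYs
    have h1 : (PySem.List.sorted (PySem.Set.ofList (items.map (fun p => p.2))) (fun x => x) true).flatMap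
        (fun c => (PySem.List.sorted (pvGroupOf items c) (fun x => x) false).map (fun bg => (bg, c)))
        |>.Perm ((PySem.List.sorted (PySem.Set.ofList (items.map (fun p => p.2))) (fun x => x) true).flatMap
        (fun c => items.filter (fun p => p.2 == c))) := by
      apply List.Perm.flatMap (List.Perm.refl _)
      intro c _
      have h3 : ((PySem.List.sorted (pvGroupOf items c) (fun x => x) false).map (fun bg => (bg, c))).Perm
          ((pvGroupOf items c).map (fun bg => (bg, c))) :=
        (PySem.List.sorted_perm _ _ _).map _
      rw [pvGroupOf] at h3
      rw [hmap_eq c] at h3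
      exact h3
    refine h1.trans ?_
    apply pv_perm_flatMap_filter (fun p : String × Int => p.2) _ items hcsnd
    intro p hp
    rw [PySem.List.mem_sorted, PySem.Set.mem_ofList]
    exact List.mem_map_of_mem hp
  · -- strictly increasing lexicographic keys
    unfold pvYs
    rw [List.flatMap_def, List.pairwise_flatten]
    constructor
    · intro L hL
      rcases List.mem_map.mp hL with ⟨c, _, rfl⟩
      rw [List.pairwise_map]
      have hle := PySem.List.sorted_pairwise (pvGroupOf items c) (fun x => x)
      have hne : (PySem.List.sorted (pvGroupOf items c) (fun x => x) false).Pairwise (· ≠ ·) := hsgnd c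
      refine (hle.and hne).imp ?_
      intro a b hab
      rw [pvLexKey, pvLexKey, Prod.Lex.lt_iff]
      exact Or.inr ⟨rfl, lt_of_le_of_ne hab.1 hab.2⟩
    · rw [List.pairwise_map]
      have hge := PySem.List.sorted_pairwise_rev (PySem.Set.ofList (items.map (fun p => p.2))) (fun x => x)
      have hne : (PySem.List.sorted (PySem.Set.ofList (items.map (fun p => p.2))) (fun x => x) true).Pairwise (· ≠ ·) := hcsnd
      refine (hge.and hne).imp ?_
      intro c c' h x hx y hy
      have hx2 : x.2 = c := by rcases List.mem_map.mp hx with ⟨bg, _, rfl⟩; rfl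
      have hy2 : y.2 = c' := by rcases List.mem_map.mp hy with ⟨bg, _, rfl⟩; rfl
      rw [pvLexKey, pvLexKey, Prod.Lex.lt_iff]
      left
      simp only [ofLex_toLex]
      rw [hx2, hy2]
      have : c' < c := lt_of_le_of_ne h.1 (Ne.symm h.2)
      omega

lemma pv_foldl_append (l : List String) : ∀ (a : String), l.foldl (· ++ ·) a = a ++ pvSconcat l := by
  induction l with
  | nil => intro a; simp [pvSconcat]
  | cons x xs ih =>
    intro a
    have h2 : pvSconcat (x :: xs) = x ++ pvSconcat xs := by
      show (x :: xs).foldl (· ++ ·) "" = _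
      rw [List.foldl_cons, ih ("" ++ x)]
      simp
    rw [List.foldl_cons, ih (a ++ x), h2, String.append_assoc]

lemma pv_sconcat_cons (x : String) (xs : List String) : pvSconcat (x :: xs) = x ++ pvSconcat xs := by
  show (x :: xs).foldl (· ++ ·) "" = _
  rw [List.foldl_cons, pv_foldl_append]
  simp

-- A's nested string-appending loops, flattened
lemma pv_nested_foldl (cs : List Int) (g : Int → List String) (a : String) :
    cs.foldl (fun acc c => (g c).foldl (fun acc x =>
        acc ++ (x ++ " " ++ PySem.Int.toStr c ++ "\n")) acc) a
    = a ++ pvSconcat (cs.flatMap (fun c => (g c).map (fun x => x ++ " " ++ PySem.Int.toStr c ++ "\n"))) := by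
  induction cs generalizing a with
  | nil => simp [pvSconcat]
  | cons c cs ih =>
    rw [List.foldl_cons, ih, List.flatMap_cons]
    have hin : (g c).foldl (fun acc x => acc ++ (x ++ " " ++ PySem.Int.toStr c ++ "\n")) a
        = ((g c).map (fun x => x ++ " " ++ PySem.Int.toStr c ++ "\n")).foldl (· ++ ·) a := by
      rw [List.foldl_map]
    rw [hin, pv_foldl_append]
    have hcat : ∀ (L M : List String), pvSconcat (L ++ M) = pvSconcat L ++ pvSconcat M := by
      intro L M
      show (L ++ M).foldl (· ++ ·) "" = _
      rw [List.foldl_append, pv_foldl_append]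
      rfl
    rw [hcat, String.append_assoc]

lemma pv_toList_sconcat (L : List String) :
    (pvSconcat L).toList = (L.map String.toList).flatten := by
  induction L with
  | nil => rfl
  | cons x xs ih =>
    rw [pv_sconcat_cons, String.toList_append, ih, List.map_cons, List.flatten_cons]

lemma pv_dropLast_flatten (T : List (List Char)) :
    ((T.map (fun t => t ++ ['\n'])).flatten).dropLast = PySem.Chars.join ['\n'] T := by
  induction T with
  | nil => simp [PySem.Chars.join_nil]
  | cons t T ih =>
    cases T with
    | nil => simp [PySem.Chars.join_singleton]
    | cons u U =>
      rw [List.map_cons, List.flatten_cons, PySem.Chars.join_cons_cons, ← ih]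
      have hne : ((List.map (fun t => t ++ ['\n']) (u :: U)).flatten) ≠ [] := by simp
      rw [List.dropLast_append_of_ne_nil hne]

-- chopping the trailing '\n' of the concatenation IS joining with '\n'
lemma pv_final_str (L : List String) :
    PySem.Str.slice (pvSconcat (L.map (· ++ "\n"))) none (some (-1)) = PySem.Str.join "\n" L := by
  rw [← String.toList_inj]
  have hsl : ∀ (s : String), PySem.Str.slice s none (some (-1))
      = String.ofList (PySem.List.slice s.toList none (some (-1))) := fun _ => rfl
  rw [hsl, String.toList_ofList, PySem.List.slice_to_neg_one, pv_toList_sconcat, PySem.Str.toList_join]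
  have h1 : (L.map (· ++ "\n")).map String.toList = (L.map String.toList).map (fun t => t ++ ['\n']) := by
    rw [List.map_map, List.map_map]
    apply List.map_congr_left
    intro s _
    simp [String.toList_append]
  rw [h1, pv_dropLast_flatten]
  rfl

-- the whole output stage, for any items list with distinct bigram keys
lemma pv_tail (items : List (String × Int)) (hnd : (items.map (fun p => p.1)).Nodup) :
    PySem.Str.slice
      ((PySem.List.sorted (items.foldl (fun sd kv =>
          match sd.get? kv.2 with
          | some l => sd.insert kv.2 (l ++ [kv.1])
          | none   => sd.insert kv.2 ([] ++ [kv.1]))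
          (PySem.Dict.empty : PySem.Dict Int (List String))).keys (fun x => x) true).foldl
        (fun acc key =>
          (PySem.List.sorted ((items.foldl (fun sd kv =>
            match sd.get? kv.2 with
            | some l => sd.insert kv.2 (l ++ [kv.1])
            | none   => sd.insert kv.2 ([] ++ [kv.1]))
            (PySem.Dict.empty : PySem.Dict Int (List String))).getD key []) (fun x => x) false).foldl
            (fun acc bigram => acc ++ (bigram ++ " " ++ PySem.Int.toStr key ++ "\n")) acc) "")
      none (some (-1))
    = PySem.Str.join "\n" ((PySem.List.sorted2 items (fun kv => -kv.2) (fun kv => kv.1)).map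
        (fun kv => kv.1 ++ " " ++ PySem.Int.toStr kv.2)) := by
  rw [pv_size_fold_eq]
  simp only [pv_size_getD, pv_size_keys]
  rw [pv_sorted2_eq, pv_sorted_lex_eq _ hnd, pv_nested_foldl]
  have hflat : ((PySem.List.sorted (PySem.Set.ofList (items.map (fun p => p.2))) (fun x => x) true).flatMap
      (fun c => (PySem.List.sorted (pvGroupOf items c) (fun x => x) false).map
        (fun x => x ++ " " ++ PySem.Int.toStr c ++ "\n")))
      = ((pvYs items).map (fun kv => kv.1 ++ " " ++ PySem.Int.toStr kv.2)).map (· ++ "\n") := by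
    rw [pvYs, List.map_flatMap, List.map_flatMap]
    apply List.flatMap_congr
    intro c _
    rw [List.map_map, List.map_map]
    rfl
  rw [hflat]
  have hempty : ∀ s : String, "" ++ s = s := by
    intro s
    rw [← String.toList_inj, String.toList_append]
    rfl
  rw [hempty, pv_final_str]

-- ===== VERDICT (by name: the statement is the Claim_ definition above) =====
theorem bigramCount_spec : Claim_equal_bigramCount := by
  intro str _
  unfold Spec_bigramCount bigramCount bigramCount_alt
  dsimp only
  rw [pv_counts_eq]
  exact pv_tail _ (pv_count_keys_nodup _)
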